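-- pv_equiv track=rewrite | github.com/jcomicsutils/some-utils | Python/AudioOrganizer.py | check_missing_tags
-- ===== SOURCE A (Python) =====
-- from typing import Optional, Dict, List, Tuple
--
-- def check_missing_tags(files_metadata: List[Dict]) -> List[str]:
--     """Checks for missing essential metadata tags."""
--     warnings = set()
--     for md in files_metadata:
--         if not md.get('title'):
--             warnings.add("[Missing Title]")
--         if not md.get('artist'):
--             warnings.add("[Missing Artist]")
--         if not md.get('album'):
--             warnings.add("[Missing Album]")
--         if not md.get('albumartist'):
--             warnings.add("[Missing Album Artist]")
--     return sorted(list(warnings))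
-- ===== SOURCE B (Python) =====
-- # Pairs are listed in sorted order of the warning strings, so no final sort is needed.
-- TAG_WARNINGS = [
--     ("albumartist", "[Missing Album Artist]"),
--     ("album", "[Missing Album]"),
--     ("artist", "[Missing Artist]"),
--     ("title", "[Missing Title]"),
-- ]
--
-- def check_missing_tags(files_metadata):
--     """Checks for missing essential metadata tags."""
--     return [warning for key, warning in TAG_WARNINGS
--             if any(not md.get(key) for md in files_metadata)]
-- ===== Notes on version B (the rewrite author's own statement) =====
-- stated objective: simpler
-- what changed: Inverts the loop nesting: instead of scanning files and accumulating warnings into a set that is then sorted, B iterates over a fixed list of (key, warning) pairs already in sorted order and includes each warning iff any file lacks a truthy value for that key, so the set, dedup and sort disappear.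
import Mathlib
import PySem

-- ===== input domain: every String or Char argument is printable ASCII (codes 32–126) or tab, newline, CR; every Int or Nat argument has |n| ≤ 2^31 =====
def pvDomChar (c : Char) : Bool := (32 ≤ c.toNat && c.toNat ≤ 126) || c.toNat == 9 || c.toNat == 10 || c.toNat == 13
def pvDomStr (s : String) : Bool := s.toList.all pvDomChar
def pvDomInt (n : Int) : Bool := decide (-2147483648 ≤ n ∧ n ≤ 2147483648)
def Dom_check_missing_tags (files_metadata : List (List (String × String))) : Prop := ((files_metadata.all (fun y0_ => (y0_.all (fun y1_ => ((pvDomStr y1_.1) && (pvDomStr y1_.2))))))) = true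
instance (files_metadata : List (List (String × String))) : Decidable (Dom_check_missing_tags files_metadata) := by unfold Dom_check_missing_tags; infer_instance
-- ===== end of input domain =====

-- B collects the four warnings by scanning the pair table (already in sorted order) with one
-- existence scan over the files per key, instead of A's per-file set accumulation plus a sort.

-- `not md.get(k)` — true iff the key is absent or its value is the empty string (Python falsy)
def pyFalsyGet (md : List (String × String)) (k : String) : Bool :=
  match (PySem.Dict.mk md).get? k with
  | none => true
  | some s => s == ""

-- ===== PORT A =====
def check_missing_tags (files_metadata : List (List (String × String))) : List String :=
  let warnings : PySem.Set String :=
    files_metadata.foldl (fun w md =>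
      let w := if pyFalsyGet md "title" then PySem.Set.add w "[Missing Title]" else w
      let w := if pyFalsyGet md "artist" then PySem.Set.add w "[Missing Artist]" else w
      let w := if pyFalsyGet md "album" then PySem.Set.add w "[Missing Album]" else w
      let w := if pyFalsyGet md "albumartist" then PySem.Set.add w "[Missing Album Artist]" else w
      w) PySem.Set.empty
  PySem.List.sorted warnings (fun x => x) false

-- ===== PORT B =====
def tagWarnings : List (String × String) :=
  [("albumartist", "[Missing Album Artist]"),
   ("album", "[Missing Album]"),
   ("artist", "[Missing Artist]"),
   ("title", "[Missing Title]")]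

def check_missing_tags_alt (files_metadata : List (List (String × String))) : List String :=
  (tagWarnings.filter (fun p => files_metadata.any (fun md => pyFalsyGet md p.1))).map (fun p => p.2)

-- ===== PRECONDITION & SPEC =====
def Spec_check_missing_tags (files_metadata : List (List (String × String))) (out : List String) : Prop := out = check_missing_tags_alt files_metadata
instance (files_metadata : List (List (String × String))) (out : List String) : Decidable (Spec_check_missing_tags files_metadata out) := by unfold Spec_check_missing_tags; infer_instance

-- ===== CLAIM (what is proved, stated in full; the proofs are below) =====
def Claim_equal_check_missing_tags : Prop := ∀ (files_metadata : List (List (String × String))), Dom_check_missing_tags files_metadata → Spec_check_missing_tags files_metadata (check_missing_tags files_metadata)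

-- ===== LEMMAS AND PROOFS =====

-- A's loop body
def stepA (w : PySem.Set String) (md : List (String × String)) : PySem.Set String :=
  let w := if pyFalsyGet md "title" then PySem.Set.add w "[Missing Title]" else w
  let w := if pyFalsyGet md "artist" then PySem.Set.add w "[Missing Artist]" else w
  let w := if pyFalsyGet md "album" then PySem.Set.add w "[Missing Album]" else w
  let w := if pyFalsyGet md "albumartist" then PySem.Set.add w "[Missing Album Artist]" else w
  w

theorem mem_stepA (w : PySem.Set String) (md : List (String × String)) (x : String) :
    x ∈ stepA w md ↔ x ∈ w
      ∨ (x = "[Missing Title]" ∧ pyFalsyGet md "title")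
      ∨ (x = "[Missing Artist]" ∧ pyFalsyGet md "artist")
      ∨ (x = "[Missing Album]" ∧ pyFalsyGet md "album")
      ∨ (x = "[Missing Album Artist]" ∧ pyFalsyGet md "albumartist") := by
  unfold stepA
  split_ifs <;> simp_all [PySem.Set.mem_add] <;> tauto

theorem nodup_stepA (w : PySem.Set String) (md : List (String × String)) (h : w.Nodup) :
    (stepA w md).Nodup := by
  unfold stepA
  split_ifs <;> repeat' apply PySem.Set.nodup_add
  all_goals exact h

theorem mem_foldA (fs : List (List (String × String))) (w : PySem.Set String) (x : String) :
    x ∈ fs.foldl stepA w ↔ x ∈ w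
      ∨ (x = "[Missing Title]" ∧ fs.any (fun md => pyFalsyGet md "title"))
      ∨ (x = "[Missing Artist]" ∧ fs.any (fun md => pyFalsyGet md "artist"))
      ∨ (x = "[Missing Album]" ∧ fs.any (fun md => pyFalsyGet md "album"))
      ∨ (x = "[Missing Album Artist]" ∧ fs.any (fun md => pyFalsyGet md "albumartist")) := by
  induction fs generalizing w with
  | nil => simp
  | cons md rest ih =>
    simp only [List.foldl_cons, ih, mem_stepA, List.any_cons, Bool.or_eq_true]
    tauto

theorem nodup_foldA (fs : List (List (String × String))) (w : PySem.Set String) (h : w.Nodup) :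
    (fs.foldl stepA w).Nodup := by
  induction fs generalizing w with
  | nil => exact h
  | cons md rest ih => exact ih _ (nodup_stepA _ _ h)

theorem mem_alt (fs : List (List (String × String))) (x : String) :
    x ∈ check_missing_tags_alt fs ↔
      (x = "[Missing Album Artist]" ∧ fs.any (fun md => pyFalsyGet md "albumartist"))
      ∨ (x = "[Missing Album]" ∧ fs.any (fun md => pyFalsyGet md "album"))
      ∨ (x = "[Missing Artist]" ∧ fs.any (fun md => pyFalsyGet md "artist"))
      ∨ (x = "[Missing Title]" ∧ fs.any (fun md => pyFalsyGet md "title")) := by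
  simp only [check_missing_tags_alt, tagWarnings, List.mem_map, List.mem_filter]
  constructor
  · rintro ⟨p, hp, rfl⟩
    simp only [List.mem_cons, List.not_mem_nil, or_false] at hp
    rcases hp with ⟨hp, hc⟩
    rcases hp with rfl | rfl | rfl | rfl <;> simp_all
  · rintro (⟨rfl, h⟩ | ⟨rfl, h⟩ | ⟨rfl, h⟩ | ⟨rfl, h⟩)
    · exact ⟨("albumartist", "[Missing Album Artist]"), by simp [h], rfl⟩
    · exact ⟨("album", "[Missing Album]"), by simp [h], rfl⟩
    · exact ⟨("artist", "[Missing Artist]"), by simp [h], rfl⟩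
    · exact ⟨("title", "[Missing Title]"), by simp [h], rfl⟩

theorem pairwise_alt (fs : List (List (String × String))) :
    (check_missing_tags_alt fs).Pairwise (fun a b => a < b) := by
  have hsub : List.Sublist (check_missing_tags_alt fs) (tagWarnings.map (fun p => p.2)) :=
    List.Sublist.map _ List.filter_sublist
  have hpw : (tagWarnings.map (fun p => p.2)).Pairwise (fun a b : String => a < b) := by
    rw [← List.isChain_iff_pairwise]
    simp only [tagWarnings, List.map_cons, List.map_nil, List.isChain_cons_cons,
      List.IsChain.singleton, and_true, String.lt_iff_toList_lt]
    refine ⟨by decide, by decide, by decide⟩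
  exact hpw.sublist hsub

theorem nodup_alt (fs : List (List (String × String))) :
    (check_missing_tags_alt fs).Nodup :=
  (pairwise_alt fs).imp (fun h => ne_of_lt h)

-- ===== VERDICT (by name: the statement is the Claim_ definition above) =====
theorem check_missing_tags_spec : Claim_equal_check_missing_tags := by
  intro fs _
  show check_missing_tags fs = check_missing_tags_alt fs
  unfold check_missing_tags
  have hfold : (fun w md =>
      let w := if pyFalsyGet md "title" then PySem.Set.add w "[Missing Title]" else w
      let w := if pyFalsyGet md "artist" then PySem.Set.add w "[Missing Artist]" else w
      let w := if pyFalsyGet md "album" then PySem.Set.add w "[Missing Album]" else w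
      let w := if pyFalsyGet md "albumartist" then PySem.Set.add w "[Missing Album Artist]" else w
      w) = stepA := rfl
  rw [hfold]
  apply PySem.List.sorted_eq_of_perm_of_pairwise_lt
  · refine (List.perm_ext_iff_of_nodup (nodup_alt fs) (nodup_foldA fs _ List.nodup_nil)).mpr ?_
    intro x
    rw [mem_alt, mem_foldA]
    simp only [List.mem_nil_iff, false_or]
    tauto
  · exact pairwise_alt fs
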